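-- pv_equiv track=rewrite | github.com/fredericlepied/test-spec-extractor | py-extractor/extract_kubespec.py | infer_purpose_from_operations
-- ===== SOURCE A (Python) =====
-- def infer_purpose_from_operations(actions: list) -> str:
--     """Try to infer purpose from the types of operations performed"""
--     pod_ops = 0
--     network_ops = 0
--     storage_ops = 0
--     operator_ops = 0
--     has_create_delete_update = False
--     has_get_list = False
--
--     for action in actions:
--         if not isinstance(action, dict):
--             continue
--
--         gvk = action.get("gvk", "").lower()
--         verb = action.get("verb", "").lower()
--
--         # Count pod-related operations
--         if "pod" in gvk or "deployment" in gvk or "replicaset" in gvk: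
--             pod_ops += 1
--             if verb in ["create", "delete", "update"]:
--                 has_create_delete_update = True
--             if verb in ["get", "list"]:
--                 has_get_list = True
--
--         # Count network-related operations
--         if "network" in gvk or "service" in gvk or "ingress" in gvk or "route" in gvk:
--             network_ops += 1
--
--         # Count storage-related operations
--         if "pvc" in gvk or "pv" in gvk or "storage" in gvk:
--             storage_ops += 1
--
--         # Count operator-related operations
--         if "operator" in gvk or "subscription" in gvk or "csv" in gvk:
--             operator_ops += 1
--
--     # Determine purpose based on operation counts
--     if pod_ops > 0 and has_create_delete_update:
--         return "POD_MANAGEMENT"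
--     if pod_ops > 0 and has_get_list:
--         return "POD_HEALTH"
--     if network_ops > 0:
--         return "NETWORK_POLICY"
--     if storage_ops > 0:
--         return "STORAGE_TESTING"
--     if operator_ops > 0:
--         return "OPERATOR_MANAGEMENT"
--
--     return "RESOURCE_VALIDATION"
-- ===== SOURCE B (Python) =====
-- def infer_purpose_from_operations(actions: list) -> str:
--     """Try to infer purpose from the types of operations performed"""
--     # pass 1: normalize every dict action to a lowered (gvk, verb) pair
--     pairs = [(a.get("gvk", "").lower(), a.get("verb", "").lower())
--              for a in actions if isinstance(a, dict)]
--
--     def is_pod(g):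
--         return "pod" in g or "deployment" in g or "replicaset" in g
--
--     has_pod = any(is_pod(g) for g, _ in pairs)
--     has_cdu = any(is_pod(g) and v in ("create", "delete", "update") for g, v in pairs)
--     has_gl = any(is_pod(g) and v in ("get", "list") for g, v in pairs)
--     has_net = any("network" in g or "service" in g or "ingress" in g or "route" in g
--                   for g, _ in pairs)
--     has_sto = any("pvc" in g or "pv" in g or "storage" in g for g, _ in pairs)
--     has_op = any("operator" in g or "subscription" in g or "csv" in g for g, _ in pairs)
--
--     if has_pod and has_cdu:
--         return "POD_MANAGEMENT"
--     if has_pod and has_gl: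
--         return "POD_HEALTH"
--     if has_net:
--         return "NETWORK_POLICY"
--     if has_sto:
--         return "STORAGE_TESTING"
--     if has_op:
--         return "OPERATOR_MANAGEMENT"
--     return "RESOURCE_VALIDATION"
-- ===== Notes on version B (the rewrite author's own statement) =====
-- stated objective: simpler
-- what changed: Replaces the single stateful counting loop (four counters plus two flags mutated per action) with a normalize-then-query decomposition: one pass builds lowered (gvk, verb) pairs, then each category is a plain any() membership test over that table.
import Mathlib
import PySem

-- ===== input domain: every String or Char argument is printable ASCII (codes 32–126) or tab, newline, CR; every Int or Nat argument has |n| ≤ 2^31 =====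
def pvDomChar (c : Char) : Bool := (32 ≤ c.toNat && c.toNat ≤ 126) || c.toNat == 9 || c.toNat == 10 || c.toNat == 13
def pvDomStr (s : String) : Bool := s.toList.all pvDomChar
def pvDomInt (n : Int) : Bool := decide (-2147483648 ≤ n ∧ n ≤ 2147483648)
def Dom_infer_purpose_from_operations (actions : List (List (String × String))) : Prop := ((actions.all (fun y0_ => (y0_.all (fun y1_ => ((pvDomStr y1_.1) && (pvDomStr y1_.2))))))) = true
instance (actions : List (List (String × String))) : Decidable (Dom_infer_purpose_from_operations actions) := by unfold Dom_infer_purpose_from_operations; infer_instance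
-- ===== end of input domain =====

-- ===== PORT A =====
-- header: B builds the lowered (gvk, verb) table once and answers each category with any();
-- same return value as A's counting loop (objective: simpler decomposition).
-- a.get(k, d) on an association-list dict: first match or default (exact for unique-key dicts)
def pvGetD (a : List (String × String)) (k d : String) : String := (a.lookup k).getD d

def pvIsPodA (gvk : String) : Bool :=
  PySem.Str.isIn "pod" gvk || PySem.Str.isIn "deployment" gvk || PySem.Str.isIn "replicaset" gvk

def pvIsNetA (gvk : String) : Bool :=
  PySem.Str.isIn "network" gvk || PySem.Str.isIn "service" gvk ||
    PySem.Str.isIn "ingress" gvk || PySem.Str.isIn "route" gvk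

def pvIsStoA (gvk : String) : Bool :=
  PySem.Str.isIn "pvc" gvk || PySem.Str.isIn "pv" gvk || PySem.Str.isIn "storage" gvk

def pvIsOpA (gvk : String) : Bool :=
  PySem.Str.isIn "operator" gvk || PySem.Str.isIn "subscription" gvk || PySem.Str.isIn "csv" gvk

-- the for-loop of A, carrying its six mutable locals (every action is a dict under the type convention)
def pvLoopA : List (List (String × String)) → Int → Int → Int → Int → Bool → Bool →
    Int × Int × Int × Int × Bool × Bool
  | [], podOps, netOps, stoOps, opOps, hasCdu, hasGl => (podOps, netOps, stoOps, opOps, hasCdu, hasGl)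
  | action :: rest, podOps, netOps, stoOps, opOps, hasCdu, hasGl =>
    let gvk := PySem.Str.lower (pvGetD action "gvk" "")
    let verb := PySem.Str.lower (pvGetD action "verb" "")
    let podOps' := if pvIsPodA gvk then podOps + 1 else podOps
    let hasCdu' := if pvIsPodA gvk && (verb == "create" || verb == "delete" || verb == "update")
      then true else hasCdu
    let hasGl' := if pvIsPodA gvk && (verb == "get" || verb == "list") then true else hasGl
    let netOps' := if pvIsNetA gvk then netOps + 1 else netOps
    let stoOps' := if pvIsStoA gvk then stoOps + 1 else stoOps
    let opOps' := if pvIsOpA gvk then opOps + 1 else opOps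
    pvLoopA rest podOps' netOps' stoOps' opOps' hasCdu' hasGl'

def infer_purpose_from_operations (actions : List (List (String × String))) : String :=
  let st := pvLoopA actions 0 0 0 0 false false
  let podOps := st.1
  let netOps := st.2.1
  let stoOps := st.2.2.1
  let opOps := st.2.2.2.1
  let hasCdu := st.2.2.2.2.1
  let hasGl := st.2.2.2.2.2
  if podOps > 0 && hasCdu then "POD_MANAGEMENT"
  else if podOps > 0 && hasGl then "POD_HEALTH"
  else if netOps > 0 then "NETWORK_POLICY"
  else if stoOps > 0 then "STORAGE_TESTING"
  else if opOps > 0 then "OPERATOR_MANAGEMENT"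
  else "RESOURCE_VALIDATION"

-- ===== PORT B =====
def infer_purpose_from_operations_alt (actions : List (List (String × String))) : String :=
  let pairs := actions.map (fun a =>
    (PySem.Str.lower (pvGetD a "gvk" ""), PySem.Str.lower (pvGetD a "verb" "")))
  let hasPod := pairs.any (fun t => pvIsPodA t.1)
  let hasCdu := pairs.any (fun t =>
    pvIsPodA t.1 && (t.2 == "create" || t.2 == "delete" || t.2 == "update"))
  let hasGl := pairs.any (fun t => pvIsPodA t.1 && (t.2 == "get" || t.2 == "list"))
  let hasNet := pairs.any (fun t =>
    PySem.Str.isIn "network" t.1 || PySem.Str.isIn "service" t.1 ||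
      PySem.Str.isIn "ingress" t.1 || PySem.Str.isIn "route" t.1)
  let hasSto := pairs.any (fun t =>
    PySem.Str.isIn "pvc" t.1 || PySem.Str.isIn "pv" t.1 || PySem.Str.isIn "storage" t.1)
  let hasOp := pairs.any (fun t =>
    PySem.Str.isIn "operator" t.1 || PySem.Str.isIn "subscription" t.1 || PySem.Str.isIn "csv" t.1)
  if hasPod && hasCdu then "POD_MANAGEMENT"
  else if hasPod && hasGl then "POD_HEALTH"
  else if hasNet then "NETWORK_POLICY"
  else if hasSto then "STORAGE_TESTING"
  else if hasOp then "OPERATOR_MANAGEMENT"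
  else "RESOURCE_VALIDATION"

-- ===== PRECONDITION & SPEC =====
def Spec_infer_purpose_from_operations (actions : List (List (String × String))) (out : String) : Prop := out = infer_purpose_from_operations_alt actions
instance (actions : List (List (String × String))) (out : String) : Decidable (Spec_infer_purpose_from_operations actions out) := by unfold Spec_infer_purpose_from_operations; infer_instance

-- ===== CLAIM (what is proved, stated in full; the proofs are below) =====
def Claim_equal_infer_purpose_from_operations : Prop := ∀ (actions : List (List (String × String))), Dom_infer_purpose_from_operations actions → Spec_infer_purpose_from_operations actions (infer_purpose_from_operations actions)

-- ===== LEMMAS AND PROOFS =====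

-- ===== VERDICT (by name: the statement is the Claim_ definition above) =====
-- pairs as B computes them
def pvPairs (actions : List (List (String × String))) : List (String × String) :=
  actions.map (fun a =>
    (PySem.Str.lower (pvGetD a "gvk" ""), PySem.Str.lower (pvGetD a "verb" "")))

-- the loop state of A, characterised over the normalized pair table
lemma pvLoopA_spec (actions : List (List (String × String)))
    (podOps netOps stoOps opOps : Int) (hasCdu hasGl : Bool) :
    pvLoopA actions podOps netOps stoOps opOps hasCdu hasGl =
      (podOps + ((pvPairs actions).countP (fun t => pvIsPodA t.1) : Int),
       netOps + ((pvPairs actions).countP (fun t => pvIsNetA t.1) : Int),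
       stoOps + ((pvPairs actions).countP (fun t => pvIsStoA t.1) : Int),
       opOps + ((pvPairs actions).countP (fun t => pvIsOpA t.1) : Int),
       hasCdu || (pvPairs actions).any (fun t =>
         pvIsPodA t.1 && (t.2 == "create" || t.2 == "delete" || t.2 == "update")),
       hasGl || (pvPairs actions).any (fun t => pvIsPodA t.1 && (t.2 == "get" || t.2 == "list"))) := by
  induction actions generalizing podOps netOps stoOps opOps hasCdu hasGl with
  | nil => simp [pvLoopA, pvPairs]
  | cons a rest ih =>
    simp only [pvLoopA]
    rw [ih]
    simp only [pvPairs, List.map_cons, List.countP_cons, List.any_cons, Prod.mk.injEq]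
    generalize PySem.Str.lower (pvGetD a "gvk" "") = g
    generalize PySem.Str.lower (pvGetD a "verb" "") = v
    refine ⟨?_, ?_, ?_, ?_, ?_, ?_⟩
    · by_cases h : pvIsPodA g = true <;> simp [h] <;> push_cast <;> omega
    · by_cases h : pvIsNetA g = true <;> simp [h] <;> push_cast <;> omega
    · by_cases h : pvIsStoA g = true <;> simp [h] <;> push_cast <;> omega
    · by_cases h : pvIsOpA g = true <;> simp [h] <;> push_cast <;> omega
    · cases h : (pvIsPodA g && (v == "create" || v == "delete" || v == "update")) <;>
        cases hasCdu <;> simp [h]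
    · cases h : (pvIsPodA g && (v == "get" || v == "list")) <;> cases hasGl <;> simp [h]

lemma pvCount_pos_decide (l : List (String × String)) (p : String × String → Bool) :
    decide ((0:Int) < ((l.countP p : Nat) : Int)) = l.any p := by
  cases h : l.any p <;>
    simp_all [Int.natCast_pos, List.countP_pos_iff, List.any_eq_true, List.any_eq_false]

lemma pvCount_pos_iff (l : List (String × String)) (p : String × String → Bool) :
    ((0:Int) < ((l.countP p : Nat) : Int)) ↔ l.any p = true := by
  simp [Int.natCast_pos, List.countP_pos_iff, List.any_eq_true]

theorem infer_purpose_from_operations_spec : Claim_equal_infer_purpose_from_operations := by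
  intro actions _
  unfold Spec_infer_purpose_from_operations
  unfold infer_purpose_from_operations infer_purpose_from_operations_alt
  rw [pvLoopA_spec]
  simp only [zero_add, Bool.false_or, gt_iff_lt, pvCount_pos_decide, pvCount_pos_iff, pvPairs,
    Bool.decide_eq_true, pvIsNetA, pvIsStoA, pvIsOpA]
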